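-- pv_equiv track=rewrite | github.com/zhteg4pvt/nemd | module/nemd/jobutils.py | pop_arg
-- ===== SOURCE A (Python) =====
-- def get_arg(args, flag, default=None, first=True):
--     """
--     Get the value after the flag in command arg list.
--
--     :param args list: the arg list
--     :param flag str: set the value after this flag
--     :param default str: the default if the flag doesn't exist or not followed by
--         value(s)
--     :param first bool: only return the first value after the flag
--     :return str or list: the value(s) after the flag
--     """
--     try:
--         idx = args.index(flag)
--     except ValueError:
--         # Flag not found
--         return default
--
--     val = args[idx + 1]
--     if val.startswith('-'):
--         # Flag followed by another flag
--         return
--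
--     if first:
--         return val
--
--     selected = []
--     for delta, arg in enumerate(args[idx + 1:]):
--         if arg.startswith('-'):
--             break
--         selected.append(arg)
--     return selected
--
-- def pop_arg(args, flag, val=None):
--     """
--     Pop the value after the flag in command arg list.
--
--     :param args list: the arg list
--     :param flag str: set the value after this flag
--     :param val str: the default if no flag found or no value(s) followed
--     :return list: the values after the flag
--     """
--     values = get_arg(args, flag, first=False)
--     if values is None:
--         try:
--             args.remove(flag)
--         except ValueError:
--             pass
--         return val
--
--     flag_idx = args.index(flag)
--     deta = len(values) if isinstance(values, list) else 1
--     for idx in reversed(range(flag_idx, flag_idx + deta + 1)):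
--         args.pop(idx)
--     return values
-- ===== SOURCE B (Python) =====
-- def pop_arg(args, flag, val=None):
--     """Pop the value(s) after the flag in command arg list (single in-place pass)."""
--     try:
--         idx = args.index(flag)
--     except ValueError:
--         return val
--     nxt = args[idx + 1]  # IndexError on a trailing flag, as the task requires
--     if nxt.startswith('-'):
--         args.remove(flag)
--         return val
--     end = idx + 1
--     while end < len(args) and not args[end].startswith('-'):
--         end += 1
--     values = args[idx + 1:end]
--     del args[idx:end]
--     return values
-- ===== Notes on version B (the rewrite author's own statement) =====
-- stated objective: simpler
-- what changed: B is one self-contained pass: a single index lookup, a direct look at the next element, one forward scan for the value run and a slice delete, replacing A's get_arg helper call (which re-slices and enumerates), A's second args.index scan and A's reversed-range pop loop.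
-- outside the precondition, e.g. on pop_arg(['a'], '-f', 'x'): A returns 'x', B returns 'x'; on pop_arg(['-f', '-g'], '-f', 'x'): A returns 'x', B returns 'x'; on pop_arg(['a', '-f'], '-f', None): A raises IndexError, B raises IndexError
import Mathlib
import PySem

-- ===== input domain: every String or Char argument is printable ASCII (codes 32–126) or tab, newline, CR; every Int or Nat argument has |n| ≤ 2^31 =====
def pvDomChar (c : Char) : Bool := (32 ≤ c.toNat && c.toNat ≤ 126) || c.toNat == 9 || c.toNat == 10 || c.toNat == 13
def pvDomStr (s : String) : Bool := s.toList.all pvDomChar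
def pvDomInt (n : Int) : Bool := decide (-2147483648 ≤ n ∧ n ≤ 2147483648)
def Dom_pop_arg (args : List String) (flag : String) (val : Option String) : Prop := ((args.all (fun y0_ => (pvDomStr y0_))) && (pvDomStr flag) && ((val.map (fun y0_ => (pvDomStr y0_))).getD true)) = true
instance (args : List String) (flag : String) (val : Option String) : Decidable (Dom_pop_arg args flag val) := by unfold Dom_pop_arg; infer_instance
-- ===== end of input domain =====

-- B replaces A's get_arg helper call + second index scan + reversed pop loop by one
-- self-contained pass (index, one forward scan, slice delete); objective: simpler.
-- Both Pythons mutate `args` in place (identically, tested); the equivalence proved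
-- here is about the RETURN value only.

-- ===== PORT A =====
-- the `for delta, arg in enumerate(args[idx+1:])` collect-until-'-' loop of get_arg
def selectLoop (l : List String) (acc : List String) : List String :=
  match l with
  | [] => acc
  | a :: rest => if PySem.Str.startswith a "-" then acc else selectLoop rest (acc ++ [a])

-- get_arg(args, flag, default=None, first=False) as called by pop_arg
def get_arg_p (args : List String) (flag : String) : Option (List String) :=
  match PySem.List.index? args flag with
  | none => none                         -- ValueError: return default (None)
  | some idx =>
    match PySem.List.pyGet? args ((idx : Int) + 1) with
    | none => none                       -- IndexError in Python (excluded by Pre_)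
    | some v =>
      if PySem.Str.startswith v "-" then none   -- bare `return` (None)
      else some (selectLoop (PySem.List.slice args (some ((idx : Int) + 1)) none) [])

def pop_arg (args : List String) (flag : String) (val : Option String) : Option (List String) :=
  match get_arg_p args flag with
  | none => val.map (fun s => [s])
    -- Python returns `val` (a str or None) here, which is not a list; Pre_ forces
    -- val = none on this path, so the Option.map wrapper is only a typed stand-in.
    -- args.remove(flag) mutates args only.
  | some values => some values           -- the reversed pop loop mutates args only

-- ===== PORT B =====
-- B's `while end < len(args) and not args[end].startswith('-'): end += 1`
def scanEnd (args : List String) (e : Nat) : Nat :=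
  if h : e < args.length then
    if PySem.Str.startswith args[e] "-" then e else scanEnd args (e + 1)
  else e
termination_by args.length - e

def pop_arg_alt (args : List String) (flag : String) (val : Option String) : Option (List String) :=
  match PySem.List.index? args flag with
  | none => val.map (fun s => [s])       -- return val (typed stand-in as above; Pre_ forces none)
  | some idx =>
    match PySem.List.pyGet? args ((idx : Int) + 1) with
    | none => none                       -- IndexError (excluded by Pre_)
    | some nxt =>
      if PySem.Str.startswith nxt "-" then val.map (fun s => [s])  -- remove flag, return val
      else
        let e := scanEnd args (idx + 1)
        some (PySem.List.slice args (some ((idx : Int) + 1)) (some (e : Int)))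
        -- `del args[idx:end]` mutates args only

-- ===== PRECONDITION & SPEC =====
-- Pre_ excludes (a) a trailing flag, on which A raises IndexError, and (b) the
-- default-return paths (flag absent, or followed by another '-' argument) with
-- val ≠ None, on which A returns the bare string val — not a value of the declared
-- list return type.
def Pre_pop_arg (args : List String) (flag : String) (val : Option String) : Prop :=
  match PySem.List.index? args flag with
  | none => val = none
  | some idx =>
    idx + 1 < args.length ∧
    (PySem.Str.startswith (args.getD (idx + 1) "") "-" = true → val = none)
instance (args : List String) (flag : String) (val : Option String) : Decidable (Pre_pop_arg args flag val) := by
  unfold Pre_pop_arg; cases PySem.List.index? args flag <;> infer_instance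

def pvWitness_pop_arg : List String × String × Option String := (["-f", "1", "2", "-g"], "-f", none)

def Spec_pop_arg (args : List String) (flag : String) (val : Option String) (out : Option (List String)) : Prop := out = pop_arg_alt args flag val
instance (args : List String) (flag : String) (val : Option String) (out : Option (List String)) : Decidable (Spec_pop_arg args flag val out) := by unfold Spec_pop_arg; infer_instance

-- ===== CLAIM (what is proved, stated in full; the proofs are below) =====
def Claim_equal_pop_arg : Prop := ∀ (args : List String) (flag : String) (val : Option String), Dom_pop_arg args flag val → Pre_pop_arg args flag val → Spec_pop_arg args flag val (pop_arg args flag val)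

-- ===== LEMMAS AND PROOFS =====

lemma le_scanEnd (args : List String) (e : Nat) : e ≤ scanEnd args e := by
  unfold scanEnd
  split
  · split
    · exact le_refl _
    · exact le_trans (Nat.le_succ e) (le_scanEnd args (e + 1))
  · exact le_refl _
termination_by args.length - e

lemma selectLoop_acc (l acc : List String) :
    selectLoop l acc = acc ++ l.takeWhile (fun a => !(PySem.Str.startswith a "-")) := by
  induction l generalizing acc with
  | nil => simp [selectLoop]
  | cons a rest ih =>
    simp only [selectLoop, List.takeWhile]
    by_cases h : PySem.Chars.startswith a.toList ['-'] = true
    · simp [h]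
    · simp [h, ih]

lemma scan_take (args : List String) (e : Nat) :
    (args.drop e).take (scanEnd args e - e)
      = (args.drop e).takeWhile (fun a => !(PySem.Str.startswith a "-")) := by
  unfold scanEnd
  split
  · rename_i h
    rw [List.drop_eq_getElem_cons h]
    split
    · rename_i hsw
      simp at hsw
      simp [List.takeWhile, hsw]
    · rename_i hsw
      simp at hsw
      have h1 : e + 1 ≤ scanEnd args (e + 1) := le_scanEnd args (e + 1)
      have h2 : scanEnd args (e + 1) - e = (scanEnd args (e + 1) - (e + 1)) + 1 := by omega
      rw [h2]
      simp only [List.take_succ_cons, List.takeWhile]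
      simp [hsw, scan_take args (e + 1)]
  · rename_i h
    have : args.drop e = [] := List.drop_eq_nil_of_le (by omega)
    simp [this]
termination_by args.length - e

theorem pop_arg_spec : Claim_equal_pop_arg := by
  intro args flag val _ hpre
  unfold Spec_pop_arg
  cases hidx : PySem.List.index? args flag with
  | none => simp only [pop_arg, pop_arg_alt, get_arg_p, hidx]
  | some idx =>
    cases hget : PySem.List.pyGet? args ((idx : Int) + 1) with
    | none =>
      exfalso
      unfold Pre_pop_arg at hpre
      rw [hidx] at hpre
      rw [PySem.List.pyGet?_eq_none_iff] at hget
      simp [PySem.Raise.InRange] at hget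
      omega
    | some v =>
      by_cases hsw : PySem.Str.startswith v "-" = true
      · simp only [pop_arg, pop_arg_alt, get_arg_p, hidx, hget, hsw, if_true]
      · have hsw' : PySem.Str.startswith v "-" = false := by
          revert hsw; cases PySem.Str.startswith v "-" <;> simp
        simp only [pop_arg, pop_arg_alt, get_arg_p, hidx, hget, hsw', Bool.false_eq_true,
          if_false]
        have hcast : ((idx : Int) + 1) = ((idx + 1 : Nat) : Int) := by push_cast; ring
        rw [hcast, PySem.List.slice_from_natCast, PySem.List.slice_natCast,
          scan_take args (idx + 1), selectLoop_acc]
        simp
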